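-- pv_equiv track=rewrite | github.com/Perlence/algorithmic-toolbox | greatest_nonascending_subsequence.py | greatest_subsequence_quad
-- ===== SOURCE A (Python) =====
-- def greatest_subsequence_quad(seq):
--     table = [1] * len(seq)
--     for i, x in enumerate(seq):
--         table[i] = 1 + max((d for j, d in enumerate(table[:i]) if seq[j] >= x), default=0)
--
--     result = []
--     maxi = max(table)
--     for i in range(len(table)-1, -1, -1):
--         if maxi < 0:
--             break
--         if table[i] == maxi:
--             result.append(i + 1)
--             maxi -= 1
--     return list(reversed(result))
-- ===== SOURCE B (Python) =====
-- def greatest_subsequence_quad(seq):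
--     # Patience-style O(n log n): tails[k] = largest possible last value of a
--     # non-ascending subsequence of length k+1 seen so far (tails is non-increasing).
--     tails = []
--     dp = []
--     for x in seq:
--         # first index with tails[idx] < x (binary search on the non-increasing tails)
--         lo, hi = 0, len(tails)
--         while lo < hi:
--             mid = (lo + hi) // 2
--             if tails[mid] < x:
--                 hi = mid
--             else:
--                 lo = mid + 1
--         if lo == len(tails):
--             tails.append(x)
--         else:
--             tails[lo] = x
--         dp.append(lo + 1)
--     result = []
--     need = len(tails)
--     for i in range(len(seq) - 1, -1, -1):
--         if need == 0:
--             break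
--         if dp[i] == need:
--             result.append(i + 1)
--             need -= 1
--     result.reverse()
--     return result
-- ===== Notes on version B (the rewrite author's own statement) =====
-- stated objective: faster
-- what changed: Replaces A's O(n^2) DP (inner scan of the whole table prefix for each element) by a patience-style algorithm: a non-increasing 'tails' list queried and updated by binary search gives each DP value in O(log n), followed by the same right-to-left index reconstruction.
-- outside the precondition, e.g. on greatest_subsequence_quad([]): A raises ValueError, B returns []
import Mathlib
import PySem

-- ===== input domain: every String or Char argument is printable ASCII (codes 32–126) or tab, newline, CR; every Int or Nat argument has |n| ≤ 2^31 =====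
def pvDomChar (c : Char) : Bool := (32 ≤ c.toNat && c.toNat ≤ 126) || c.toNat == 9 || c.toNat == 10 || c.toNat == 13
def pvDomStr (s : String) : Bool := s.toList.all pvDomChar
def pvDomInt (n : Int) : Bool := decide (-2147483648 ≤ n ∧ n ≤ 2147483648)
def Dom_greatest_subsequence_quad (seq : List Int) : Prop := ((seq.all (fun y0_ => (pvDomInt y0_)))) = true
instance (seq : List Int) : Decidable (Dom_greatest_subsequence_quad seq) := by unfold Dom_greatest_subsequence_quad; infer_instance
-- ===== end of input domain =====

-- B replaces A's O(n^2) inner scan of the DP table by a patience-style binary search on a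
-- non-increasing tails list (O(n log n)); same return value on every nonempty input (A raises on []).

-- ===== PORT A =====

-- max(l) / max(gen, default=0): Python's max; the [] case of pyMaxD0A is max(..., default=0);
-- the [] case of pyMaxD0A also stands in for max([]), which raises ValueError in Python — Pre_ excludes that input (seq = []).
def pyMaxD0A (l : List Int) : Int :=
  match l with
  | [] => 0
  | h :: t => t.foldl max h

-- table[i] = 1 + max((d for j, d in enumerate(table[:i]) if seq[j] >= x), default=0)
-- (table is filled left to right and table[:i] reads only the already-assigned prefix,
--  so the in-place array is modelled by the grown prefix list t)
def stepA (seq : List Int) (t : List Int) (ix : Int × Int) : List Int :=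
  t ++ [1 + pyMaxD0A ((PySem.List.enumerate (PySem.List.slice t (some 0) (some ix.1)) 0).filterMap
      (fun jd => if (PySem.List.pyGet? seq jd.1).getD 0 ≥ ix.2 then some jd.2 else none))]

-- for i in range(len(table)-1, -1, -1): …  (with the break on maxi < 0)
def recA (idxs : List Int) (table : List Int) (maxi : Int) (res : List Int) : List Int :=
  match idxs with
  | [] => res
  | i :: rest =>
    if maxi < 0 then res
    else if (PySem.List.pyGet? table i).getD 0 = maxi then recA rest table (maxi - 1) (res ++ [i + 1])
    else recA rest table maxi res

def greatest_subsequence_quad (seq : List Int) : List Int :=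
  let table := (PySem.List.enumerate seq 0).foldl (stepA seq) []
  let maxi := pyMaxD0A table   -- max(table); Python raises ValueError when seq = [] — excluded by Pre_
  (recA (PySem.List.pyRange ((table.length : Int) - 1) (-1) (-1)) table maxi []).reverse

-- ===== PORT B =====

-- the while lo < hi binary-search loop (indices are Nats in range, so getD is exact)
def bsearchB (tails : List Int) (x : Int) (lo hi : Nat) : Nat :=
  if _h : lo < hi then
    let mid := (lo + hi) / 2
    if tails.getD mid 0 < x then bsearchB tails x lo mid
    else bsearchB tails x (mid + 1) hi
  else lo
termination_by hi - lo
decreasing_by all_goals omega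

-- one iteration of B's main loop: acc = (tails, dp)
def stepB (acc : List Int × List Int) (x : Int) : List Int × List Int :=
  let tails := acc.1
  let pos := bsearchB tails x 0 tails.length
  let tails' := if pos = tails.length then tails ++ [x] else tails.set pos x
  (tails', acc.2 ++ [(pos : Int) + 1])

-- for i in range(len(seq)-1, -1, -1): …  (with the break on need == 0)
def recB (idxs : List Int) (dp : List Int) (need : Nat) (res : List Int) : List Int :=
  match idxs with
  | [] => res
  | i :: rest =>
    if need = 0 then res
    else if (PySem.List.pyGet? dp i).getD 0 = (need : Int) then recB rest dp (need - 1) (res ++ [i + 1])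
    else recB rest dp need res

def greatest_subsequence_quad_alt (seq : List Int) : List Int :=
  let acc := seq.foldl stepB ([], [])
  (recB (PySem.List.pyRange ((seq.length : Int) - 1) (-1) (-1)) acc.2 acc.1.length []).reverse

-- ===== PRECONDITION & SPEC =====
-- Pre_ excludes only seq = [], on which A raises ValueError (max() of an empty table).
def Pre_greatest_subsequence_quad (seq : List Int) : Prop := seq ≠ []
instance (seq : List Int) : Decidable (Pre_greatest_subsequence_quad seq) := by
  unfold Pre_greatest_subsequence_quad; infer_instance
def pvWitness_greatest_subsequence_quad : List Int := [3, 1, 2]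

def Spec_greatest_subsequence_quad (seq : List Int) (out : List Int) : Prop := out = greatest_subsequence_quad_alt seq
instance (seq : List Int) (out : List Int) : Decidable (Spec_greatest_subsequence_quad seq out) := by unfold Spec_greatest_subsequence_quad; infer_instance

-- ===== CLAIM (what is proved, stated in full; the proofs are below) =====
def Claim_equal_greatest_subsequence_quad : Prop := ∀ (seq : List Int), Dom_greatest_subsequence_quad seq → Pre_greatest_subsequence_quad seq → Spec_greatest_subsequence_quad seq (greatest_subsequence_quad seq)
-- ===== LEMMAS AND PROOFS =====

-- ---- the common DP model both ports are reduced to ----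

-- best DP value among processed pairs (value, dp) whose value is ≥ x (0 if none)
def mval (pr : List (Int × Int)) (x : Int) : Int :=
  pyMaxD0A ((pr.filter (fun p => decide (x ≤ p.1))).map Prod.snd)

-- the processed prefix as (value, dp) pairs
def model : List (Int × Int) → List Int → List (Int × Int)
  | pr, [] => pr
  | pr, x :: r => model (pr ++ [(x, 1 + mval pr x)]) r

-- ---- pyMaxD0A facts ----

lemma pyMaxD0A_mem_or (l : List Int) : pyMaxD0A l = 0 ∨ pyMaxD0A l ∈ l := by
  cases l with
  | nil => exact Or.inl rfl
  | cons h t =>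
    right
    rcases PySem.List.foldl_max_mem t h with h1 | h1
    · simp [pyMaxD0A, h1]
    · simp [pyMaxD0A]; right; exact h1

lemma pyMaxD0A_ge {l : List Int} {a : Int} (h : a ∈ l) : a ≤ pyMaxD0A l := by
  cases l with
  | nil => cases h
  | cons x t =>
    rcases List.mem_cons.mp h with rfl | hm
    · exact (PySem.List.le_foldl_max t a).1
    · exact (PySem.List.le_foldl_max t x).2 a hm

lemma pyMaxD0A_le {l : List Int} {c : Int} (h0 : 0 ≤ c) (h : ∀ a ∈ l, a ≤ c) :
    pyMaxD0A l ≤ c := by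
  rcases pyMaxD0A_mem_or l with he | hm
  · omega
  · exact h _ hm

lemma pyMaxD0A_nonneg {l : List Int} (h : ∀ a ∈ l, 0 ≤ a) : 0 ≤ pyMaxD0A l := by
  rcases pyMaxD0A_mem_or l with he | hm
  · omega
  · exact h _ hm

lemma pyMaxD0A_append_singleton {l : List Int} {a : Int} (h0 : 0 ≤ a) :
    pyMaxD0A (l ++ [a]) = max (pyMaxD0A l) a := by
  cases l with
  | nil => simp [pyMaxD0A]; omega
  | cons h t => simp [pyMaxD0A, List.foldl_append]

-- ---- model facts ----

lemma mem_le_mval {pr : List (Int × Int)} {x : Int} {p : Int × Int}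
    (hp : p ∈ pr) (hx : x ≤ p.1) : p.2 ≤ mval pr x := by
  apply pyMaxD0A_ge
  exact List.mem_map.mpr ⟨p, List.mem_filter.mpr ⟨hp, by simpa⟩, rfl⟩

lemma mval_nonneg {pr : List (Int × Int)} {x : Int} (h : ∀ p ∈ pr, 1 ≤ p.2) :
    0 ≤ mval pr x := by
  apply pyMaxD0A_nonneg
  intro a ha
  rcases List.mem_map.mp ha with ⟨p, hp, rfl⟩
  have := h p (List.mem_filter.mp hp).1
  omega

lemma mval_le {pr : List (Int × Int)} {x : Int} {c : Int} (h0 : 0 ≤ c)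
    (h : ∀ p ∈ pr, x ≤ p.1 → p.2 ≤ c) : mval pr x ≤ c := by
  apply pyMaxD0A_le h0
  intro a ha
  rcases List.mem_map.mp ha with ⟨p, hp, rfl⟩
  rcases List.mem_filter.mp hp with ⟨hp1, hp2⟩
  exact h p hp1 (by simpa using hp2)

lemma model_length : ∀ (l : List Int) (pr : List (Int × Int)),
    (model pr l).length = pr.length + l.length := by
  intro l
  induction l with
  | nil => intro pr; simp [model]
  | cons x r ih => intro pr; simp [model, ih]; omega

lemma model_snd_ge1 : ∀ (l : List Int) (pr : List (Int × Int)),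
    (∀ p ∈ pr, 1 ≤ p.2) → ∀ p ∈ model pr l, 1 ≤ p.2 := by
  intro l
  induction l with
  | nil => intro pr h; exact h
  | cons x r ih =>
    intro pr h
    apply ih
    intro p hp
    rcases List.mem_append.mp hp with hp | hp
    · exact h p hp
    · simp at hp; subst hp; have := mval_nonneg (x := x) h; simp; omega

-- ---- A bridge: the literal fold equals the model ----

lemma enum_filt (seq : List Int) (x : Int) :
    ∀ (pr : List (Int × Int)) (s : Nat),
    (∀ (j : Nat), j < pr.length → PySem.List.pyGet? seq ((s + j : Nat) : Int) = some (pr[j]?.getD (0,0)).1) →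
    (PySem.List.enumerate (pr.map Prod.snd) ((s : Nat) : Int)).filterMap
        (fun jd => if (PySem.List.pyGet? seq jd.1).getD 0 ≥ x then some jd.2 else none)
      = (pr.filter (fun p => decide (x ≤ p.1))).map Prod.snd := by
  intro pr
  induction pr with
  | nil => intro s h; simp [PySem.List.enumerate_nil]
  | cons p pr' ih =>
    intro s h
    have h0 := h 0 (by simp)
    simp only [Nat.add_zero] at h0
    simp only [List.getElem?_cons_zero, Option.getD_some] at h0
    have htail : ∀ (j : Nat), j < pr'.length →
        PySem.List.pyGet? seq (((s + 1) + j : Nat) : Int) = some (pr'[j]?.getD (0,0)).1 := by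
      intro j hj
      have := h (j + 1) (by simp; omega)
      simpa [Nat.add_comm, Nat.add_assoc, Nat.add_left_comm] using this
    have ihs := ih (s + 1) htail
    simp only [List.map_cons, PySem.List.enumerate_cons, List.filterMap_cons, h0]
    have hcast : ((s : Nat) : Int) + 1 = (((s + 1 : Nat)) : Int) := by push_cast; ring
    rw [hcast, ihs]
    by_cases hc : x ≤ p.1
    · simp [hc, h0]
    · simp [hc, h0, not_le.mp hc]

lemma A_fold : ∀ (suf : List Int) (pr : List (Int × Int)),
    (PySem.List.enumerate suf ((pr.length : Nat) : Int)).foldl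
        (stepA (pr.map Prod.fst ++ suf)) (pr.map Prod.snd)
      = (model pr suf).map Prod.snd := by
  intro suf
  induction suf with
  | nil => intro pr; simp [PySem.List.enumerate_nil, model]
  | cons x r ih =>
    intro pr
    rw [PySem.List.enumerate_cons, List.foldl_cons]
    have hstep : stepA (pr.map Prod.fst ++ x :: r) (pr.map Prod.snd) (((pr.length : Nat) : Int), x)
        = (pr ++ [(x, 1 + mval pr x)]).map Prod.snd := by
      unfold stepA
      have hslice : PySem.List.slice (pr.map Prod.snd) (some 0) (some ((pr.length : Nat) : Int))
          = pr.map Prod.snd := by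
        rw [PySem.List.slice_zero_start, PySem.List.slice_to_natCast]
        exact List.take_of_length_le (by simp)
      rw [hslice]
      have hidx : ∀ (j : Nat), j < pr.length →
          PySem.List.pyGet? (pr.map Prod.fst ++ x :: r) ((0 + j : Nat) : Int)
            = some (pr[j]?.getD (0,0)).1 := by
        intro j hj
        rw [Nat.zero_add, PySem.List.pyGet?_natCast]
        rw [List.getElem?_append_left (by simpa using hj)]
        simp [List.getElem?_map, List.getElem?_eq_getElem hj]
      have := enum_filt (pr.map Prod.fst ++ x :: r) x pr 0 hidx
      simp only [Nat.cast_zero] at this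
      rw [this]
      simp [mval]
    rw [hstep]
    have harr : (pr ++ [(x, 1 + mval pr x)]).map Prod.fst ++ r = pr.map Prod.fst ++ x :: r := by
      simp
    have hlen : ((pr.length : Nat) : Int) + 1 = (((pr ++ [(x, 1 + mval pr x)]).length : Nat) : Int) := by
      simp
    rw [hlen, ← harr, ih (pr ++ [(x, 1 + mval pr x)])]
    rfl

lemma A_table (seq : List Int) :
    (PySem.List.enumerate seq 0).foldl (stepA seq) [] = (model [] seq).map Prod.snd := by
  simpa using A_fold seq []

-- ---- B invariant ----

def InvB (pr : List (Int × Int)) (tails : List Int) : Prop :=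
  ((tails.length : Int) = pyMaxD0A (pr.map Prod.snd)) ∧
  List.Pairwise (fun a b => b ≤ a) tails ∧
  (∀ p ∈ pr, 1 ≤ p.2) ∧
  ∀ (k : Nat) (hk : k < tails.length),
    (∃ p ∈ pr, ((k : Int) + 1 ≤ p.2 ∧ p.1 = tails[k])) ∧
    (∀ p ∈ pr, (k : Int) + 1 ≤ p.2 → p.1 ≤ tails[k])

lemma InvB_nil : InvB [] [] := by
  refine ⟨by simp [pyMaxD0A], by simp, by simp, ?_⟩
  intro k hk; simp at hk

lemma pairwise_ge_getElem {tails : List Int} (hs : List.Pairwise (fun a b => b ≤ a) tails)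
    {i j : Nat} (hij : i ≤ j) (hj : j < tails.length) :
    tails[j] ≤ tails[i]'(lt_of_le_of_lt hij hj) := by
  rcases Nat.lt_or_ge i j with h | h
  · exact List.pairwise_iff_getElem.mp hs i j _ hj h
  · have : i = j := by omega
    subst this; exact le_refl _

lemma bsearchB_spec (tails : List Int) (x : Int)
    (hs : List.Pairwise (fun a b => b ≤ a) tails) :
    ∀ (n lo hi : Nat), hi - lo ≤ n → lo ≤ hi → hi ≤ tails.length →
    (∀ k, k < lo → x ≤ tails.getD k 0) →
    (∀ k, hi ≤ k → k < tails.length → tails.getD k 0 < x) →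
    (∀ k, k < bsearchB tails x lo hi → x ≤ tails.getD k 0) ∧
    (∀ k, bsearchB tails x lo hi ≤ k → k < tails.length → tails.getD k 0 < x) ∧
    bsearchB tails x lo hi ≤ tails.length := by
  intro n
  induction n with
  | zero =>
    intro lo hi hfuel hle hhi h1 h2
    have : lo = hi := by omega
    subst this
    rw [bsearchB]
    simp only [lt_irrefl, dite_false]
    exact ⟨h1, h2, by omega⟩
  | succ n ih =>
    intro lo hi hfuel hle hhi h1 h2
    rw [bsearchB]
    by_cases hlt : lo < hi
    · simp only [hlt, dite_true]
      have hmid1 : lo ≤ (lo + hi) / 2 := by omega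
      have hmid2 : (lo + hi) / 2 < hi := by omega
      by_cases hc : tails.getD ((lo + hi) / 2) 0 < x
      · simp only [hc, if_true]
        apply ih lo ((lo + hi) / 2) (by omega) (by omega) (by omega) h1
        intro k hk1 hk2
        rw [List.getD_eq_getElem _ _ hk2]
        have hmlt : (lo + hi) / 2 < tails.length := by omega
        calc tails[k] ≤ tails[(lo + hi) / 2] := pairwise_ge_getElem hs hk1 hk2
          _ < x := by rwa [List.getD_eq_getElem _ _ hmlt] at hc
      · simp only [hc, if_false]
        apply ih ((lo + hi) / 2 + 1) hi (by omega) (by omega) hhi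
        · intro k hk
          by_cases hklo : k < lo
          · exact h1 k hklo
          · have hk2 : k < tails.length := by omega
            rw [List.getD_eq_getElem _ _ hk2]
            have hmlt : (lo + hi) / 2 < tails.length := by omega
            have := pairwise_ge_getElem hs (show k ≤ (lo + hi) / 2 by omega) hmlt
            rw [List.getD_eq_getElem _ _ hmlt] at hc
            omega
        · exact h2
    · simp only [hlt, dite_false]
      have heq : lo = hi := by omega
      subst heq
      exact ⟨h1, h2, by omega⟩

lemma bsearchB_full (tails : List Int) (x : Int)
    (hs : List.Pairwise (fun a b => b ≤ a) tails) :
    (∀ k, k < bsearchB tails x 0 tails.length → x ≤ tails.getD k 0) ∧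
    (∀ k, bsearchB tails x 0 tails.length ≤ k → k < tails.length → tails.getD k 0 < x) ∧
    bsearchB tails x 0 tails.length ≤ tails.length :=
  bsearchB_spec tails x hs tails.length 0 tails.length (by omega) (by omega) le_rfl
    (by omega) (by omega)

lemma pos_eq {pr : List (Int × Int)} {tails : List Int} (x : Int) (h : InvB pr tails) :
    ((bsearchB tails x 0 tails.length : Nat) : Int) = mval pr x := by
  obtain ⟨ha, hsrt, hge1, h4⟩ := h
  obtain ⟨S1, S2, S3⟩ := bsearchB_full tails x hsrt
  set r := bsearchB tails x 0 tails.length with hr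
  apply le_antisymm
  · -- (r : Int) ≤ mval
    by_cases hr0 : r = 0
    · rw [hr0]; exact_mod_cast mval_nonneg hge1
    · have hrlen : r - 1 < tails.length := by omega
      have hx := S1 (r - 1) (by omega)
      rw [List.getD_eq_getElem _ _ hrlen] at hx
      obtain ⟨p, hp, hd, heq⟩ := (h4 (r - 1) hrlen).1
      have hxp : x ≤ p.1 := heq ▸ hx
      have := mem_le_mval hp hxp
      have hcast : ((r - 1 : Nat) : Int) + 1 = (r : Int) := by omega
      omega
  · -- mval ≤ (r : Int)
    apply mval_le (by exact_mod_cast Nat.zero_le r)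
    intro p hp hxp
    by_contra hgt
    push_neg at hgt
    have hd : (r : Int) + 1 ≤ p.2 := by omega
    have hple : p.2 ≤ (tails.length : Int) := by
      rw [ha]; exact pyMaxD0A_ge (List.mem_map.mpr ⟨p, hp, rfl⟩)
    have hrlen : r < tails.length := by omega
    have hlt := S2 r le_rfl hrlen
    rw [List.getD_eq_getElem _ _ hrlen] at hlt
    have := (h4 r hrlen).2 p hp hd
    omega

lemma inv_step {pr : List (Int × Int)} {tails : List Int} (x : Int) (h : InvB pr tails) :
    ((bsearchB tails x 0 tails.length : Nat) : Int) + 1 = 1 + mval pr x ∧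
    InvB (pr ++ [(x, 1 + mval pr x)])
      (if bsearchB tails x 0 tails.length = tails.length then tails ++ [x]
       else tails.set (bsearchB tails x 0 tails.length) x) := by
  have hE := pos_eq x h
  obtain ⟨ha, hsrt, hge1, h4⟩ := h
  obtain ⟨S1, S2, S3⟩ := bsearchB_full tails x hsrt
  set r := bsearchB tails x 0 tails.length with hrdef
  have hM0 : 0 ≤ mval pr x := mval_nonneg hge1
  have hsnd : (pr ++ [(x, 1 + mval pr x)]).map Prod.snd = pr.map Prod.snd ++ [1 + mval pr x] := by
    simp
  have hmax : pyMaxD0A ((pr ++ [(x, 1 + mval pr x)]).map Prod.snd)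
      = max (pyMaxD0A (pr.map Prod.snd)) (1 + mval pr x) := by
    rw [hsnd, pyMaxD0A_append_singleton (by omega)]
  have hS1' : ∀ k, k < r → (hk : k < tails.length) → x ≤ tails[k] := by
    intro k hk hklen
    have := S1 k hk
    rwa [List.getD_eq_getElem _ _ hklen] at this
  have hS2' : ∀ k, r ≤ k → (hk : k < tails.length) → tails[k] < x := by
    intro k hk hklen
    have := S2 k hk hklen
    rwa [List.getD_eq_getElem _ _ hklen] at this
  refine ⟨by omega, ?_⟩
  have hge1' : ∀ p ∈ pr ++ [(x, 1 + mval pr x)], 1 ≤ p.2 := by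
    intro p hp
    rcases List.mem_append.mp hp with hp | hp
    · exact hge1 p hp
    · simp at hp; subst hp; simp; omega
  by_cases hcase : r = tails.length
  · rw [if_pos hcase]
    refine ⟨?_, ?_, hge1', ?_⟩
    · rw [hmax, ← ha]
      simp only [List.length_append, List.length_cons, List.length_nil]
      have : mval pr x = (tails.length : Int) := by rw [← hE, hcase]
      push_cast
      omega
    · rw [List.pairwise_append]
      refine ⟨hsrt, by simp, ?_⟩
      intro a hma b hmb
      simp at hmb; subst hmb
      rcases List.mem_iff_getElem.mp hma with ⟨k, hk, rfl⟩
      exact hS1' k (by omega) hk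
    · intro k hk
      simp only [List.length_append, List.length_cons, List.length_nil] at hk
      by_cases hklen : k < tails.length
      · have hget : (tails ++ [x])[k]'(by simp; omega) = tails[k] :=
          List.getElem_append_left hklen
        rw [hget]
        obtain ⟨⟨p, hp, hd, heq⟩, hub⟩ := h4 k hklen
        refine ⟨⟨p, List.mem_append_left _ hp, hd, heq⟩, ?_⟩
        intro q hq hdq
        rcases List.mem_append.mp hq with hq | hq
        · exact hub q hq hdq
        · simp at hq; subst hq
          exact hS1' k (by omega) hklen
      · have hkeq : k = tails.length := by omega
        subst hkeq
        have hget : (tails ++ [x])[tails.length]'(by simp) = x := by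
          simp
        rw [hget]
        constructor
        · refine ⟨(x, 1 + mval pr x), List.mem_append_right _ (by simp), ?_, rfl⟩
          have : mval pr x = (tails.length : Int) := by rw [← hE, hcase]
          simp; omega
        · intro q hq hdq
          rcases List.mem_append.mp hq with hq | hq
          · exfalso
            have : q.2 ≤ (tails.length : Int) := by
              rw [ha]; exact pyMaxD0A_ge (List.mem_map.mpr ⟨q, hq, rfl⟩)
            omega
          · simp at hq; subst hq; exact le_refl x
  · rw [if_neg hcase]
    have hrlen : r < tails.length := by omega
    have hsetlen : (tails.set r x).length = tails.length := by simp
    refine ⟨?_, ?_, hge1', ?_⟩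
    · rw [hmax, ← ha, hsetlen]
      have : mval pr x = (r : Int) := by omega
      rw [this]
      have : (r : Int) + 1 ≤ (tails.length : Int) := by exact_mod_cast hrlen
      omega
    · rw [List.pairwise_iff_getElem]
      intro i j hi hj hij
      rw [hsetlen] at hi hj
      rw [List.getElem_set, List.getElem_set]
      by_cases hi' : r = i
      · subst hi'
        rw [if_pos rfl, if_neg (by omega)]
        exact le_of_lt (hS2' j (by omega) hj)
      · rw [if_neg hi']
        by_cases hj' : r = j
        · subst hj'
          rw [if_pos rfl]
          exact hS1' i (by omega) hi
        · rw [if_neg hj']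
          exact List.pairwise_iff_getElem.mp hsrt i j hi hj hij
    · intro k hk
      rw [hsetlen] at hk
      rw [List.getElem_set]
      by_cases hkr : r = k
      · subst hkr
        rw [if_pos rfl]
        constructor
        · refine ⟨(x, 1 + mval pr x), List.mem_append_right _ (by simp), ?_, rfl⟩
          simp; omega
        · intro q hq hdq
          rcases List.mem_append.mp hq with hq | hq
          · by_contra hgt
            push_neg at hgt
            have := mem_le_mval hq (le_of_lt hgt)
            omega
          · simp at hq; subst hq; exact le_refl x
      · rw [if_neg hkr]
        obtain ⟨⟨p, hp, hd, heq⟩, hub⟩ := h4 k hk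
        refine ⟨⟨p, List.mem_append_left _ hp, hd, heq⟩, ?_⟩
        intro q hq hdq
        rcases List.mem_append.mp hq with hq | hq
        · exact hub q hq hdq
        · simp at hq; subst hq
          have hkr' : k < r := by omega
          exact hS1' k hkr' hk

lemma foldB_spec : ∀ (suf : List Int) (pr : List (Int × Int)) (tails : List Int),
    InvB pr tails →
    (suf.foldl stepB (tails, pr.map Prod.snd)).2 = (model pr suf).map Prod.snd ∧
    InvB (model pr suf) (suf.foldl stepB (tails, pr.map Prod.snd)).1 := by
  intro suf
  induction suf with
  | nil => intro pr tails h; exact ⟨rfl, h⟩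
  | cons x r ih =>
    intro pr tails h
    obtain ⟨hE, hInv'⟩ := inv_step x h
    have hstep : stepB (tails, pr.map Prod.snd) x
        = ((if bsearchB tails x 0 tails.length = tails.length then tails ++ [x]
            else tails.set (bsearchB tails x 0 tails.length) x),
           (pr ++ [(x, 1 + mval pr x)]).map Prod.snd) := by
      unfold stepB
      simp only [List.map_append, List.map_cons, List.map_nil]
      rw [hE]
    rw [List.foldl_cons, hstep]
    exact ih (pr ++ [(x, 1 + mval pr x)]) _ hInv'

-- ---- reconstruction loops agree ----

lemma recA_zero : ∀ (idxs : List Int) (table res : List Int),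
    (∀ i ∈ idxs, ∃ v, PySem.List.pyGet? table i = some v ∧ 1 ≤ v) →
    recA idxs table 0 res = res := by
  intro idxs
  induction idxs with
  | nil => intro table res _; rfl
  | cons i rest ih =>
    intro table res h
    obtain ⟨v, hv, hv1⟩ := h i (by simp)
    unfold recA
    rw [if_neg (by omega), hv]
    simp only [Option.getD_some]
    rw [if_neg (by omega)]
    exact ih table res (fun j hj => h j (by simp [hj]))

lemma rec_eq : ∀ (idxs : List Int) (table res : List Int) (need : Nat),
    (∀ i ∈ idxs, ∃ v, PySem.List.pyGet? table i = some v ∧ 1 ≤ v) →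
    recA idxs table ((need : Nat) : Int) res = recB idxs table need res := by
  intro idxs
  induction idxs with
  | nil => intro table res need _; rfl
  | cons i rest ih =>
    intro table res need h
    obtain ⟨v, hv, hv1⟩ := h i (by simp)
    have htail : ∀ j ∈ rest, ∃ v, PySem.List.pyGet? table j = some v ∧ 1 ≤ v :=
      fun j hj => h j (by simp [hj])
    by_cases hn : need = 0
    · subst hn
      unfold recB
      simp only [if_pos rfl]
      exact recA_zero (i :: rest) table res h
    · unfold recA recB
      rw [if_neg (by omega), if_neg hn, hv]
      simp only [Option.getD_some]
      by_cases hvn : v = ((need : Nat) : Int)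
      · rw [if_pos hvn, if_pos hvn]
        have hcast : ((need : Nat) : Int) - 1 = (((need - 1 : Nat)) : Int) := by omega
        rw [hcast]
        exact ih table (res ++ [i + 1]) (need - 1) htail
      · rw [if_neg hvn, if_neg hvn]
        exact ih table res need htail

lemma range_valid (table : List Int) (h1 : ∀ a ∈ table, 1 ≤ a) :
    ∀ i ∈ PySem.List.pyRange ((table.length : Int) - 1) (-1) (-1),
      ∃ v, PySem.List.pyGet? table i = some v ∧ 1 ≤ v := by
  intro i hi
  rw [PySem.List.mem_pyRange_neg_one] at hi
  have h0 : 0 ≤ i := by omega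
  have hlt : i < (table.length : Int) := by omega
  have := PySem.List.pyGet?_eq_some_getElem (xs := table) h0 (by exact_mod_cast hlt)
  exact ⟨table[i.toNat], this, h1 _ (List.getElem_mem _)⟩

-- ===== VERDICT (by name: the statement is the Claim_ definition above) =====

theorem greatest_subsequence_quad_spec : Claim_equal_greatest_subsequence_quad := by
  intro seq _hdom _hpre
  unfold Spec_greatest_subsequence_quad
  simp only [greatest_subsequence_quad, greatest_subsequence_quad_alt]
  have hA := A_table seq
  have hB := foldB_spec seq [] [] InvB_nil
  simp only [List.map_nil] at hB
  obtain ⟨hB2, hBInv⟩ := hB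
  rw [hA, hB2]
  set T := (model [] seq).map Prod.snd with hT
  have hlenT : T.length = seq.length := by
    rw [hT]; simp [model_length]
  have h1 : ∀ a ∈ T, 1 ≤ a := by
    intro a ha
    rcases List.mem_map.mp ha with ⟨p, hp, rfl⟩
    exact model_snd_ge1 seq [] (by simp) p hp
  have hmaxi : pyMaxD0A T = (((seq.foldl stepB ([], [])).1.length : Nat) : Int) := by
    rw [hT]; exact hBInv.1.symm
  rw [hmaxi, ← hlenT]
  exact congrArg List.reverse (rec_eq _ T [] _ (range_valid T h1))
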